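-- pv_equiv track=rewrite | github.com/thy-amigo/OBS_ST | gw/tx_logParser.py | get_disconnect_reason
-- ===== SOURCE A (Python) =====
-- def get_disconnect_reason(res):
--     got_sent=False
--     for line in res:
--         if got_sent:
--             if len(line)>0:
--                 return line
--         if "Sent:" in line:
--             got_sent=True
-- ===== SOURCE B (Python) =====
-- def get_disconnect_reason(res):
--     # Right fold: scan backwards, maintaining for the current suffix
--     #   first_ne = its first nonempty line, ans = the answer for the suffix.
--     ans = None
--     first_ne = None
--     for line in reversed(res):
--         if "Sent:" in line:
--             ans = first_ne
--         if len(line) > 0: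
--             first_ne = line
--     return ans
-- ===== Notes on version B (the rewrite author's own statement) =====
-- stated objective: alternative
-- what changed: Replaces A's forward early-exit scan with a boolean flag by a single backwards fold with two accumulators (answer-so-far and first-nonempty-line of the suffix), returning the accumulated answer with no early exit.
import Mathlib
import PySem

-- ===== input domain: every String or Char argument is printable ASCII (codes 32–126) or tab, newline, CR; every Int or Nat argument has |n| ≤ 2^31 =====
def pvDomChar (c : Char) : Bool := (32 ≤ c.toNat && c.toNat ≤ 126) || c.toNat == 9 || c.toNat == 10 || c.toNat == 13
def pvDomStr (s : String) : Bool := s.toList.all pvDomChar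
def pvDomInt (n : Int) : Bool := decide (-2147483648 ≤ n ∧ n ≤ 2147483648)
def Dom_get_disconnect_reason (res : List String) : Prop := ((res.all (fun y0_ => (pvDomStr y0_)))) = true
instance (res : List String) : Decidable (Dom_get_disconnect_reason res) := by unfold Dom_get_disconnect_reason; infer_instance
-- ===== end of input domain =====

-- B replaces A's forward early-exit scan (boolean flag) by a single backwards fold carrying
-- (answer-so-far, first nonempty line of the suffix); same return value, different traversal.

-- ===== PORT A =====
def pvALoop : List String → Bool → Option String
  | [], _ => none
  | line :: rest, got =>
    if got && decide (0 < PySem.Str.len line) then some line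
    else pvALoop rest (got || PySem.Str.isIn "Sent:" line)

def get_disconnect_reason (res : List String) : Option String :=
  pvALoop res false

-- ===== PORT B =====
-- the body of B's `for line in reversed(res)` loop, state = (ans, first_ne)
def pvBStep (st : Option String × Option String) (line : String) :
    Option String × Option String :=
  ( if PySem.Str.isIn "Sent:" line then st.2 else st.1,
    if 0 < PySem.Str.len line then some line else st.2 )

def get_disconnect_reason_alt (res : List String) : Option String :=
  (res.reverse.foldl pvBStep (none, none)).1

-- ===== PRECONDITION & SPEC =====
def Spec_get_disconnect_reason (res : List String) (out : Option String) : Prop := out = get_disconnect_reason_alt res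
instance (res : List String) (out : Option String) : Decidable (Spec_get_disconnect_reason res out) := by unfold Spec_get_disconnect_reason; infer_instance

-- ===== CLAIM (what is proved, stated in full; the proofs are below) =====
def Claim_equal_get_disconnect_reason : Prop := ∀ (res : List String), Dom_get_disconnect_reason res → Spec_get_disconnect_reason res (get_disconnect_reason res)

-- ===== LEMMAS AND PROOFS =====
-- joint invariant: the backwards fold computes (A's answer, first nonempty line),
-- where pvALoop res true is exactly "first nonempty line of res".
lemma pvFold_spec (res : List String) :
    (res.reverse.foldl pvBStep (none, none)).1 = pvALoop res false ∧
    (res.reverse.foldl pvBStep (none, none)).2 = pvALoop res true := by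
  rw [List.foldl_reverse]
  induction res with
  | nil => exact ⟨rfl, rfl⟩
  | cons l rest ih =>
    obtain ⟨ih1, ih2⟩ := ih
    simp only [pvBStep] at ih1 ih2
    simp only [List.foldr_cons]
    show (pvBStep _ l).1 = _ ∧ (pvBStep _ l).2 = _
    simp only [pvBStep, pvALoop, ih1, ih2, Bool.false_and, Bool.true_and,
      Bool.false_or, Bool.true_or, if_neg (by simp : ¬(false = true))]
    constructor
    · cases hb : PySem.Str.isIn "Sent:" l <;> simp_all
    · cases hb : decide ((0:Int) < PySem.Str.len l) <;> simp_all

-- ===== VERDICT =====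
theorem get_disconnect_reason_spec : Claim_equal_get_disconnect_reason := by
  intro res _
  unfold Spec_get_disconnect_reason get_disconnect_reason get_disconnect_reason_alt
  exact (pvFold_spec res).1.symm
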